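-- pv_equiv track=rewrite | github.com/AshokRajuDatla99/neuralnetcodes | pnn.py | aspect_ratio
-- ===== SOURCE A (Python) =====
-- def aspect_ratio(char):
--
--     max_length = 0
--     for i in range(1, len(char)-1):
--         length = 0
--         start = 0
--         end = 0
--         for j in range(1,len(char[0])-1):
--             if char[i][j] == 1 and start == 0:
--                 start = j
--
--             elif char[i][j]==1 and start!=0:
--                 end = j
--         if end > start:
--             length = end - start  + 1
--         if (length > max_length):
--             max_length = length
--
--     return max_length
-- ===== SOURCE B (Python) =====
-- def aspect_ratio(char):
--     if not char or len(char[0]) <= 2: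
--         return 0
--     w = len(char[0])
--
--     def row_span(row):
--         inner = row[1:w - 1]
--         if 1 not in inner:
--             return 0
--         span = len(inner) - inner[::-1].index(1) - inner.index(1)
--         return span if span > 1 else 0
--
--     return max((row_span(r) for r in char[1:-1]), default=0)
-- ===== Notes on version B (the rewrite author's own statement) =====
-- stated objective: simpler
-- what changed: Replaces A's per-row forward state machine tracking start/end flags by slicing out each row's interior, finding the first 1 with .index on the slice and the last 1 with .index on the reversed slice, and taking max() with a default over the interior rows.
import Mathlib
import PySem

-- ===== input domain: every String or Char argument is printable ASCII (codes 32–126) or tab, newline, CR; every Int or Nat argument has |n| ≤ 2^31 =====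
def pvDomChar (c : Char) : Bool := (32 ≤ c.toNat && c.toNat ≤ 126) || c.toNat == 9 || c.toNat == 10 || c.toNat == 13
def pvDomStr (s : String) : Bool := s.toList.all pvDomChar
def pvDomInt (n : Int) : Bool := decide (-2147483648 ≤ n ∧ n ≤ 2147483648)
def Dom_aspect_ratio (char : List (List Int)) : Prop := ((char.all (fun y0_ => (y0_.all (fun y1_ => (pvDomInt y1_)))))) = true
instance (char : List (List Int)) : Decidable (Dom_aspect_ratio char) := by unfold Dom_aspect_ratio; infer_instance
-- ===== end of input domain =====

-- B: instead of A's per-row forward scan with start/end flag state, B slices out the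
-- interior of each row, locates the first 1 with .index on the slice and the last 1
-- with .index on the reversed slice, and takes max() over rows (simpler decomposition).

-- ===== PORT A =====
def aspect_ratio (char : List (List Int)) : Int :=
  (PySem.List.pyRange 1 ((char.length : Int) - 1) 1).foldl (fun max_length i =>
    let row := PySem.List.pyGetD char i []
    let w : Int := (PySem.List.pyGetD char 0 []).length
    let se := (PySem.List.pyRange 1 (w - 1) 1).foldl (fun (se : Int × Int) j =>
      if PySem.List.pyGetD row j 0 == 1 && se.1 == 0 then (j, se.2)
      else if PySem.List.pyGetD row j 0 == 1 && se.1 != 0 then (se.1, j)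
      else se) (0, 0)
    let length : Int := if se.2 > se.1 then se.2 - se.1 + 1 else 0
    if length > max_length then length else max_length) 0

-- ===== PORT B =====
-- row_span(row): inner = row[1:w-1]; if 1 not in inner: 0; else span via reversed-slice index.
-- The two `.index(1)` calls are guarded by `1 in inner`, so `index?` is `some` there and
-- the `.getD 0` is exact.
def rowSpan (w : Int) (row : List Int) : Int :=
  let inner := PySem.List.slice row (some 1) (some (w - 1))
  if inner.contains 1 then
    let rev := (PySem.List.slice? inner none none (-1)).getD []   -- inner[::-1]
    let span : Int := (inner.length : Int)
      - (((PySem.List.index? rev 1).getD 0 : Nat) : Int)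
      - (((PySem.List.index? inner 1).getD 0 : Nat) : Int)
    if span > 1 then span else 0
  else 0

def aspect_ratio_alt (char : List (List Int)) : Int :=
  if char.isEmpty || (PySem.List.pyGetD char 0 []).length ≤ 2 then 0
  else
    PySem.List.maxD
      ((PySem.List.slice char (some 1) (some (-1))).map
        (rowSpan ((PySem.List.pyGetD char 0 []).length)))
      (fun x => x) 0

-- ===== PRECONDITION & SPEC =====
-- Pre_ excludes exactly the ragged grids on which Python A raises IndexError:
-- the first row is wider than 2 (so the inner loop runs) and some interior row is
-- shorter than len(char[0]) - 1, making char[i][j] go out of range.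
def Pre_aspect_ratio (char : List (List Int)) : Prop :=
  ∀ i < char.length, 1 ≤ i → i + 1 < char.length →
    (char.headD []).length ≤ (char.getD i []).length + 1 ∨ (char.headD []).length ≤ 2
instance (char : List (List Int)) : Decidable (Pre_aspect_ratio char) := by
  unfold Pre_aspect_ratio; infer_instance
def pvWitness_aspect_ratio : List (List Int) := [[0,0,0,0],[0,1,1,0],[0,0,0,0]]
def Spec_aspect_ratio (char : List (List Int)) (out : Int) : Prop := out = aspect_ratio_alt char
instance (char : List (List Int)) (out : Int) : Decidable (Spec_aspect_ratio char out) := by unfold Spec_aspect_ratio; infer_instance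

-- ===== CLAIM (what is proved, stated in full; the proofs are below) =====
def Claim_equal_aspect_ratio : Prop := ∀ (char : List (List Int)), Dom_aspect_ratio char → Pre_aspect_ratio char → Spec_aspect_ratio char (aspect_ratio char)

-- ===== LEMMAS AND PROOFS =====


theorem idxAt (l : List Int) (k : Nat) (hk : k < l.length) (h1 : l[k] = 1)
    (h0 : ∀ j (hj : j < k), l[j]'(lt_trans hj hk) ≠ 1) : PySem.List.index? l 1 = some k := by
  rw [PySem.List.index?_eq_some_iff]
  refine ⟨l.take k, l.drop (k+1), ?_, by simp [hk.le], ?_⟩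
  · conv_lhs => rw [← List.take_append_drop k l]
    rw [← List.getElem_cons_drop hk, h1]
  · intro hmem
    obtain ⟨j, hj, hje⟩ := List.mem_iff_getElem.mp hmem
    rw [List.getElem_take] at hje
    exact h0 j (by simp at hj; omega) hje

theorem last_max {l : List Int} (h : l.Pairwise (· < ·)) (hne : l ≠ []) :
    ∀ x ∈ l, x ≤ l.getLast hne := by
  induction l with
  | nil => simp at hne
  | cons a t ih =>
    intro x hx
    rcases t with _ | ⟨b, u⟩
    · simp at hx; simp [hx]
    · rw [List.getLast_cons (by simp)]
      rcases List.mem_cons.mp hx with rfl | hx'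
      · exact le_of_lt ((List.pairwise_cons.mp h).1 _ (List.getLast_mem _))
      · exact ih (List.pairwise_cons.mp h).2 (by simp) x hx'

theorem maxD_id_nonneg (l : List Int) (h : ∀ x ∈ l, 0 ≤ x) :
    PySem.List.maxD l (fun x => x) 0 = l.foldl max 0 := by
  cases l with
  | nil => simp [PySem.List.maxD, PySem.List.max?]
  | cons x t =>
    rw [PySem.List.maxD, PySem.List.max?_id_cons]
    simp only [Option.getD_some, List.foldl_cons]
    rw [max_eq_right (h x (by simp))]

theorem zero_fold (l : List Int) (acc : Int) (hacc : 0 ≤ acc) :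
    l.foldl (fun m _ => if (0:Int) > m then 0 else m) acc = acc := by
  induction l with
  | nil => rfl
  | cons x t ih => simpa [hacc, not_lt.mpr hacc] using ih

-- A's inner fold once start is set (s ≠ 0): start stays s, end becomes the last 1-position (default e).
theorem foldA_pos (row : List Int) (js : List Int) (s : Int) (hs : s ≠ 0) : ∀ e : Int,
    js.foldl (fun (se : Int × Int) j =>
      if PySem.List.pyGetD row j 0 == 1 && se.1 == 0 then (j, se.2)
      else if PySem.List.pyGetD row j 0 == 1 && se.1 != 0 then (se.1, j)
      else se) (s, e)
    = (s, ((js.filter (fun j => PySem.List.pyGetD row j 0 == 1)).getLast?).getD e) := by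
  induction js with
  | nil => intro e; simp
  | cons j rest ih =>
    intro e
    by_cases hv : PySem.List.pyGetD row j 0 == 1
    · have h1 : (if PySem.List.pyGetD row j 0 == 1 && (s, e).1 == 0 then (j, (s, e).2)
          else if PySem.List.pyGetD row j 0 == 1 && (s, e).1 != 0 then ((s, e).1, j)
          else (s, e)) = (s, j) := by simp [hv, hs]
      rw [List.foldl_cons, h1, ih j]
      simp only [List.filter_cons, hv, if_pos trivial]
      cases h : rest.filter (fun j => PySem.List.pyGetD row j 0 == 1) with
      | nil => simp
      | cons p ps => simp [List.getLast?_cons]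
    · have h1 : (if PySem.List.pyGetD row j 0 == 1 && (s, e).1 == 0 then (j, (s, e).2)
          else if PySem.List.pyGetD row j 0 == 1 && (s, e).1 != 0 then ((s, e).1, j)
          else (s, e)) = (s, e) := by simp [hv]
      rw [List.foldl_cons, h1, ih e]
      simp [hv]

-- A's inner fold from (0,0): start = first 1-position (or 0), end = last of the remaining ones (or 0).
theorem foldA_zero (row : List Int) (js : List Int) (hpos : ∀ j ∈ js, 0 < j) :
    js.foldl (fun (se : Int × Int) j =>
      if PySem.List.pyGetD row j 0 == 1 && se.1 == 0 then (j, se.2)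
      else if PySem.List.pyGetD row j 0 == 1 && se.1 != 0 then (se.1, j)
      else se) (0, 0)
    = (match js.filter (fun j => PySem.List.pyGetD row j 0 == 1) with
       | [] => ((0 : Int), (0 : Int))
       | p :: rest => (p, (rest.getLast?).getD 0)) := by
  induction js with
  | nil => simp
  | cons j rest ih =>
    by_cases hv : PySem.List.pyGetD row j 0 == 1
    · have hj : j ≠ 0 := by have := hpos j (by simp); omega
      have h1 : (if PySem.List.pyGetD row j 0 == 1 && ((0 : Int), (0 : Int)).1 == 0 then (j, ((0 : Int), (0 : Int)).2)
          else if PySem.List.pyGetD row j 0 == 1 && ((0 : Int), (0 : Int)).1 != 0 then (((0 : Int), (0 : Int)).1, j)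
          else ((0 : Int), (0 : Int))) = ((j : Int), (0 : Int)) := by simp [hv]
      rw [List.foldl_cons, h1, foldA_pos row rest j hj 0]
      simp [hv]
    · have h1 : (if PySem.List.pyGetD row j 0 == 1 && ((0 : Int), (0 : Int)).1 == 0 then (j, ((0 : Int), (0 : Int)).2)
          else if PySem.List.pyGetD row j 0 == 1 && ((0 : Int), (0 : Int)).1 != 0 then (((0 : Int), (0 : Int)).1, j)
          else ((0 : Int), (0 : Int))) = ((0 : Int), (0 : Int)) := by simp [hv]
      rw [List.foldl_cons, h1, ih (fun x hx => hpos x (by simp [hx]))]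
      simp [hv]

-- per-row equality: A's start/end span over columns 1..W-2 equals rowSpan, given the row is long enough
theorem row_eq (row : List Int) (W : Nat) (hW : 2 < W) (hlen : W - 1 ≤ row.length) :
    (let se := (PySem.List.pyRange 1 ((W : Int) - 1) 1).foldl (fun (se : Int × Int) j =>
        if PySem.List.pyGetD row j 0 == 1 && se.1 == 0 then (j, se.2)
        else if PySem.List.pyGetD row j 0 == 1 && se.1 != 0 then (se.1, j)
        else se) (0, 0)
     if se.2 > se.1 then se.2 - se.1 + 1 else 0)
    = rowSpan (W : Int) row := by
  have hw1 : (W : Int) - 1 = ((W - 1 : Nat) : Int) := by omega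
  set inner := PySem.List.slice row (some 1) (some ((W : Int) - 1)) with hinner
  have hinner' : inner = (row.drop 1).take (W - 2) := by
    rw [hinner, hw1, show ((1:Int)) = ((1:Nat):Int) by norm_num, PySem.List.slice_natCast]
    congr 1
  have hlen_inner : inner.length = W - 2 := by
    rw [hinner']; simp; omega
  have hget : ∀ k, k < W - 2 → inner[k]? = some (PySem.List.pyGetD row ((k : Int) + 1) 0) := by
    intro k hk
    have hk1 : 1 + k < row.length := by omega
    rw [PySem.List.pyGetD_eq_getElem row 0 (by omega) (by omega)]
    rw [hinner']
    rw [List.getElem?_take_of_lt hk, List.getElem?_drop]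
    rw [List.getElem?_eq_getElem hk1]
    have hidx : 1 + k = ((k : Int) + 1).toNat := by omega
    simp only [← hidx]
  set ps := (PySem.List.pyRange 1 ((W : Int) - 1) 1).filter
      (fun j => PySem.List.pyGetD row j 0 == 1) with hps_def
  have mem_ps : ∀ j : Int, j ∈ ps ↔ (1 ≤ j ∧ j < (W : Int) - 1) ∧ PySem.List.pyGetD row j 0 = 1 := by
    intro j
    rw [hps_def, List.mem_filter, PySem.List.mem_pyRange_one]
    simp
  have hpos : ∀ j ∈ PySem.List.pyRange 1 ((W : Int) - 1) 1, (0:Int) < j := by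
    intro j hj
    have := (PySem.List.mem_pyRange_one.mp hj).1
    omega
  have hmem_iff : (1:Int) ∈ inner ↔ ps ≠ [] := by
    constructor
    · intro h1
      obtain ⟨k, hk, hke⟩ := List.mem_iff_getElem.mp h1
      have hk2 : k < W - 2 := by omega
      have hmm : ((k:Int) + 1) ∈ ps := by
        rw [mem_ps]
        refine ⟨⟨by omega, by omega⟩, ?_⟩
        have hh := hget k hk2
        rw [List.getElem?_eq_getElem hk, hke] at hh
        exact ((Option.some.injEq _ _).mp hh).symm
      intro hnil; rw [hnil] at hmm; simp at hmm
    · intro hne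
      obtain ⟨j, hj⟩ := List.exists_mem_of_ne_nil _ hne
      obtain ⟨⟨hj1, hjW⟩, hjv⟩ := (mem_ps j).mp hj
      have hk2 : j.toNat - 1 < W - 2 := by omega
      have hh := hget (j.toNat - 1) hk2
      rw [show ((j.toNat - 1 : Nat) : Int) + 1 = j by omega, hjv] at hh
      exact List.mem_of_getElem? hh
  simp only [rowSpan]
  rw [foldA_zero row _ hpos, ← hps_def, ← hinner]
  cases hps : ps with
  | nil =>
    have hnmem : (1:Int) ∉ inner := fun h => (hmem_iff.mp h) hps
    simp [hnmem]
  | cons p rest =>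
    have mem_ps' : ∀ j : Int, j ∈ p :: rest ↔ (1 ≤ j ∧ j < (W : Int) - 1) ∧ PySem.List.pyGetD row j 0 = 1 := by
      intro j; rw [← hps]; exact mem_ps j
    have hpair : (p :: rest).Pairwise (· < ·) := by
      rw [← hps]
      exact List.Pairwise.filter _ (PySem.List.pairwise_lt_pyRange_one 1 ((W : Int) - 1))
    have hpmem : p ∈ p :: rest := by simp
    obtain ⟨⟨hp1, hpW⟩, hpval⟩ := (mem_ps' p).mp hpmem
    have hmin : ∀ j ∈ p :: rest, p ≤ j := by
      intro j hj
      rcases List.mem_cons.mp hj with rfl | hj'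
      · exact le_refl _
      · exact le_of_lt ((List.pairwise_cons.mp hpair).1 _ hj')
    set q := (p :: rest).getLast (by simp) with hq_def
    have hqmax : ∀ x ∈ p :: rest, x ≤ q := last_max hpair (by simp)
    have hqmem : q ∈ p :: rest := List.getLast_mem _
    obtain ⟨⟨hq1, hqW⟩, hqval⟩ := (mem_ps' q).mp hqmem
    have hpq : p ≤ q := hmin q hqmem
    have h1mem : (1:Int) ∈ inner := by
      have hk2 : p.toNat - 1 < W - 2 := by omega
      have hh := hget (p.toNat - 1) hk2
      rw [show ((p.toNat - 1 : Nat) : Int) + 1 = p by omega, hpval] at hh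
      exact List.mem_of_getElem? hh
    have ha_lt : p.toNat - 1 < inner.length := by omega
    have hia : inner[p.toNat - 1]'ha_lt = 1 := by
      have hh := hget (p.toNat - 1) (by omega)
      rw [show ((p.toNat - 1 : Nat) : Int) + 1 = p by omega, hpval,
          List.getElem?_eq_getElem ha_lt] at hh
      exact (Option.some.injEq _ _).mp hh
    have hidx1 : PySem.List.index? inner 1 = some (p.toNat - 1) := by
      apply idxAt inner (p.toNat - 1) ha_lt hia
      intro j hj hcontra
      have hjW2 : j < W - 2 := by omega
      have hmm : ((j:Int) + 1) ∈ p :: rest := by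
        rw [mem_ps']
        refine ⟨⟨by omega, by omega⟩, ?_⟩
        have hh := hget j hjW2
        rw [List.getElem?_eq_getElem (by omega : j < inner.length), hcontra] at hh
        exact ((Option.some.injEq _ _).mp hh).symm
      have := hmin _ hmm
      omega
    have hb_lt : q.toNat - 1 < inner.length := by omega
    have hib : inner[q.toNat - 1]'hb_lt = 1 := by
      have hh := hget (q.toNat - 1) (by omega)
      rw [show ((q.toNat - 1 : Nat) : Int) + 1 = q by omega, hqval,
          List.getElem?_eq_getElem hb_lt] at hh
      exact (Option.some.injEq _ _).mp hh
    have hm0_lt : W - 2 - q.toNat < inner.reverse.length := by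
      simp [hlen_inner]; omega
    have hrv : inner.reverse[W - 2 - q.toNat]'hm0_lt = 1 := by
      rw [List.getElem_reverse]
      have heq : inner.length - 1 - (W - 2 - q.toNat) = q.toNat - 1 := by omega
      simp only [heq]
      exact hib
    have hidx2 : PySem.List.index? inner.reverse 1 = some (W - 2 - q.toNat) := by
      apply idxAt inner.reverse (W - 2 - q.toNat) hm0_lt hrv
      intro j hj hcontra
      rw [List.getElem_reverse] at hcontra
      have hkb : q.toNat - 1 < inner.length - 1 - j := by omega
      have hkW : inner.length - 1 - j < W - 2 := by omega
      have hmm : (((inner.length - 1 - j : Nat):Int) + 1) ∈ p :: rest := by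
        rw [mem_ps']
        refine ⟨⟨by omega, by omega⟩, ?_⟩
        have hh := hget (inner.length - 1 - j) hkW
        rw [List.getElem?_eq_getElem (by omega : inner.length - 1 - j < inner.length), hcontra] at hh
        exact ((Option.some.injEq _ _).mp hh).symm
      have := hqmax _ hmm
      omega
    have hc : inner.contains 1 = true := by simpa using h1mem
    rw [PySem.List.slice?_none_none_neg_one, if_pos hc]
    simp only [Option.getD_some, hidx1, hidx2, hlen_inner]
    cases rest with
    | nil =>
      have hqp : q = p := by rw [hq_def]; rfl
      simp only [List.getLast?_nil, Option.getD_none]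
      rw [hqp] at hq1 hqW hqval hpq ⊢
      split_ifs <;> omega
    | cons r rs =>
      have hqe : ((r :: rs).getLast?).getD 0 = q := by
        rw [hq_def, List.getLast_cons (by simp : r :: rs ≠ [])]
        rw [List.getLast?_eq_some_getLast (by simp : r :: rs ≠ [])]
        rfl
      have hpltq : p < q := by
        apply (List.pairwise_cons.mp hpair).1 q
        rw [hq_def, List.getLast_cons (by simp : r :: rs ≠ [])]
        exact List.getLast_mem _
      rw [hqe]
      split_ifs <;> omega

theorem rowSpan_nonneg (w : Int) (row : List Int) : 0 ≤ rowSpan w row := by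
  simp only [rowSpan]
  split_ifs <;> omega

-- char[1:-1] is exactly the list of rows A indexes with i in range(1, len(char)-1)
theorem slice_rows (char : List (List Int)) (hne : char ≠ []) :
    PySem.List.slice char (some 1) (some (-1))
      = (PySem.List.pyRange 1 ((char.length : Int) - 1) 1).map
          (fun i => PySem.List.pyGetD char i []) := by
  have hn : 1 ≤ char.length := List.length_pos_of_ne_nil hne
  have hmap : (PySem.List.pyRange 1 ((char.length : Int) - 1) 1).map
        (fun i => PySem.List.pyGetD char i [])
      = (PySem.List.pyRange 1 ((char.dropLast.length : Int)) 1).map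
        (fun i => PySem.List.pyGetD char.dropLast i []) := by
    have hb : (char.length : Int) - 1 = (char.dropLast.length : Int) := by
      simp [List.length_dropLast]; omega
    rw [hb]
    apply List.map_congr_left
    intro j hj
    obtain ⟨hj1, hj2⟩ := PySem.List.mem_pyRange_one.mp hj
    have hjlt : j.toNat < char.dropLast.length := by omega
    have hjlt2 : j.toNat < char.length := by simp [List.length_dropLast] at hjlt; omega
    rw [PySem.List.pyGetD_eq_getElem char [] (by omega) (by omega),
        PySem.List.pyGetD_eq_getElem char.dropLast [] (by omega) (by omega)]
    rw [List.getElem_dropLast]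
  rw [hmap, PySem.List.map_pyGetD_pyRange' char.dropLast [] (by norm_num)]
  simp only [PySem.List.slice, PySem.List.clampIdx]
  norm_num
  rw [min_eq_left hn, if_neg (by omega), List.dropLast_eq_take, ← List.drop_one, List.drop_take]
  congr 1
  omega

-- ===== VERDICT (by name: the statement is the Claim_ definition above) =====
theorem aspect_ratio_spec : Claim_equal_aspect_ratio := by
  intro char _ hpre
  unfold Spec_aspect_ratio aspect_ratio aspect_ratio_alt
  by_cases hne : char = []
  · subst hne
    simp [PySem.List.pyRange_one_eq_nil (by norm_num : (-1 : Int) ≤ 1)]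
  have hn : 1 ≤ char.length := List.length_pos_of_ne_nil hne
  have hhead : char.headD [] = PySem.List.pyGetD char 0 [] := by
    cases char with
    | nil => rfl
    | cons c t => rw [PySem.List.pyGetD_zero_cons]; rfl
  set W := (PySem.List.pyGetD char 0 []).length with hW_def
  by_cases hW2 : W ≤ 2
  · -- no interior columns: the inner range is empty, both sides are 0
    rw [if_pos (by simp [hW2])]
    rw [PySem.List.foldl_congr_mem _ _ (fun m _ => if (0:Int) > m then 0 else m) 0 ?_]
    · exact zero_fold _ 0 le_rfl
    · intro m i _
      simp only []
      rw [PySem.List.pyRange_one_eq_nil (by omega : (W:Int) - 1 ≤ 1)]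
      simp
  · rw [if_neg (by simp; exact ⟨hne, by omega⟩)]
    have hWgt : 2 < W := by omega
    have hrow : ∀ i : Int, i ∈ PySem.List.pyRange 1 ((char.length : Int) - 1) 1 →
        W - 1 ≤ (PySem.List.pyGetD char i []).length := by
      intro i hi
      obtain ⟨hi1, hi2⟩ := PySem.List.mem_pyRange_one.mp hi
      have hmem := hpre i.toNat (by omega) (by omega) (by omega)
      rw [hhead, ← hW_def] at hmem
      rcases hmem with h | h
      · rw [PySem.List.pyGetD_of_nonneg char [] (by omega)]
        omega
      · omega
    rw [PySem.List.foldl_congr_mem _ _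
      (fun m i => if rowSpan (W : Int) (PySem.List.pyGetD char i []) > m
        then rowSpan (W : Int) (PySem.List.pyGetD char i []) else m) 0 ?_]
    · rw [PySem.List.foldl_congr_mem _ _
        (fun m i => max m (rowSpan (W : Int) (PySem.List.pyGetD char i []))) 0 ?_]
      · rw [slice_rows char hne, List.map_map]
        rw [maxD_id_nonneg _ (by
          intro x hx
          obtain ⟨i, _, rfl⟩ := List.mem_map.mp hx
          exact rowSpan_nonneg _ _)]
        rw [List.foldl_map]
        rfl
      · intro m i _
        by_cases h : rowSpan (W : Int) (PySem.List.pyGetD char i []) > m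
        · simp [h, max_eq_right h.le]
        · simp [h, max_eq_left (not_lt.mp h)]
    · intro m i hi
      simp only []
      rw [row_eq (PySem.List.pyGetD char i []) W hWgt (hrow i hi)]
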